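-- pv_equiv track=rewrite | github.com/davidiach/erdos97 | src/erdos97/vertex_circle_order_filter.py | angular_witness_order
-- ===== SOURCE A (Python) =====
-- from typing import Sequence
--
-- def angular_witness_order(
--     order: Sequence[int],
--     center: int,
--     witnesses: Sequence[int],
-- ) -> list[int]:
--     """Return witnesses in angular order around a convex-hull vertex center.
--
--     For a strict convex polygon, the angular order around a hull vertex is the
--     cyclic boundary order with the center removed, up to reversal. Reversal
--     preserves interval-containment relations.
--     """
--     n = len(order)
--     positions = {label: idx for idx, label in enumerate(order)}
--     if center not in positions:
--         raise ValueError(f"center {center} is missing from cyclic order")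
--     missing = [witness for witness in witnesses if witness not in positions]
--     if missing:
--         raise ValueError(f"witness {missing[0]} is missing from cyclic order")
--     center_pos = positions[center]
--     return sorted(witnesses, key=lambda witness: (positions[witness] - center_pos) % n)
-- ===== SOURCE B (Python) =====
-- def angular_witness_order(order, center, witnesses):
--     n = len(order)
--     positions = {label: idx for idx, label in enumerate(order)}
--     if center not in positions:
--         raise ValueError(f"center {center} is missing from cyclic order")
--     missing = [witness for witness in witnesses if witness not in positions]
--     if missing:
--         raise ValueError(f"witness {missing[0]} is missing from cyclic order")
--     center_pos = positions[center]
--     buckets = [[] for _ in range(n)]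
--     for witness in witnesses:
--         buckets[(positions[witness] - center_pos) % n].append(witness)
--     result = []
--     for bucket in buckets:
--         result.extend(bucket)
--     return result
-- ===== Notes on version B (the rewrite author's own statement) =====
-- stated objective: alternative
-- what changed: Replaced the comparison sort keyed by cyclic offset with a stable counting/bucket sort: witnesses are appended to one of n buckets indexed by (positions[w]-center_pos)%n and the buckets are concatenated in ascending index order.
import Mathlib
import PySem

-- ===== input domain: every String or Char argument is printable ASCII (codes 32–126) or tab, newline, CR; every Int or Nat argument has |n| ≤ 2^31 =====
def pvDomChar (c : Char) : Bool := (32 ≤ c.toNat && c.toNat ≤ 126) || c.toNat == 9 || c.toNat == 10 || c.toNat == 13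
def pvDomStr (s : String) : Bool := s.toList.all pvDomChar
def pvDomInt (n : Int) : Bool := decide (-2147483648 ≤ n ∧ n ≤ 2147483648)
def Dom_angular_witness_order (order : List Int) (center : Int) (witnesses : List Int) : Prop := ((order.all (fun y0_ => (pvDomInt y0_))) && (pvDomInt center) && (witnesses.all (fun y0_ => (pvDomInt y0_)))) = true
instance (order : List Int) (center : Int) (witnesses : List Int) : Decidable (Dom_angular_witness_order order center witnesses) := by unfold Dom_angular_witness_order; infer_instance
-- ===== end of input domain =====

-- B replaces the comparison sort keyed by the cyclic offset with a stable bucket (counting) sort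
-- over the key range [0, n); same validation, same return value (objective: alternative algorithm).

-- ===== PORT A =====
-- positions = {label: idx for idx, label in enumerate(order)}  (shared verbatim by both Pythons)
def pvPositions (order : List Int) : PySem.Dict Int Int :=
  (PySem.List.enumerate order 0).foldl (fun d p => d.insert p.2 p.1) PySem.Dict.empty

-- The two `raise ValueError` paths are excluded by Pre_ below; on Pre_ neither fires.
def angular_witness_order (order : List Int) (center : Int) (witnesses : List Int) : List Int :=
  let n : Int := (order.length : Int)
  let positions := pvPositions order
  let center_pos := positions.getD center 0
  PySem.List.sorted witnesses (fun witness => PySem.Int.mod (positions.getD witness 0 - center_pos) n) false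

-- ===== PORT B =====
def angular_witness_order_alt (order : List Int) (center : Int) (witnesses : List Int) : List Int :=
  let n := order.length
  let positions := pvPositions order
  let center_pos := positions.getD center 0
  let buckets := witnesses.foldl
    (fun bs witness =>
      bs.modify ((PySem.Int.mod (positions.getD witness 0 - center_pos) (n : Int)).toNat) (· ++ [witness]))
    (List.replicate n ([] : List Int))
  buckets.foldl (fun result bucket => result ++ bucket) []

-- ===== PRECONDITION & SPEC =====
-- Pre_ excludes exactly the inputs where A raises ValueError: center missing from order,
-- or some witness missing from order.
def Pre_angular_witness_order (order : List Int) (center : Int) (witnesses : List Int) : Prop :=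
  center ∈ order ∧ ∀ w ∈ witnesses, w ∈ order
instance (order : List Int) (center : Int) (witnesses : List Int) : Decidable (Pre_angular_witness_order order center witnesses) := by unfold Pre_angular_witness_order; infer_instance

def pvWitness_angular_witness_order : List Int × Int × List Int := ([1, 2, 3], 2, [3, 1, 3])

def Spec_angular_witness_order (order : List Int) (center : Int) (witnesses : List Int) (out : List Int) : Prop := out = angular_witness_order_alt order center witnesses
instance (order : List Int) (center : Int) (witnesses : List Int) (out : List Int) : Decidable (Spec_angular_witness_order order center witnesses out) := by unfold Spec_angular_witness_order; infer_instance

-- ===== CLAIM (what is proved, stated in full; the proofs are below) =====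
def Claim_equal_angular_witness_order : Prop := ∀ (order : List Int) (center : Int) (witnesses : List Int), Dom_angular_witness_order order center witnesses → Pre_angular_witness_order order center witnesses → Spec_angular_witness_order order center witnesses (angular_witness_order order center witnesses)

-- ===== LEMMAS AND PROOFS =====

-- the positions dict: any stored value is a valid index of `order` pointing back at its key
theorem pvFoldlInsertGetP {P : Int → Int → Prop} (l : List (Int × Int)) (d : PySem.Dict Int Int)
    (hd : ∀ w i, d.get? w = some i → P w i) (hl : ∀ p ∈ l, P p.2 p.1)
    (w i : Int) (h : (l.foldl (fun d p => d.insert p.2 p.1) d).get? w = some i) : P w i := by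
  induction l generalizing d with
  | nil => exact hd w i h
  | cons p l ih =>
    refine ih (d.insert p.2 p.1) ?_ (fun q hq => hl q (List.mem_cons_of_mem _ hq)) h
    intro w' i' h'
    rw [PySem.Dict.get?_insert] at h'
    by_cases hw : w' = p.2
    · simp [hw] at h'
      exact h' ▸ hw ▸ hl p (List.mem_cons_self)
    · simp [hw] at h'
      exact hd w' i' h'

theorem pvPositions_spec (order : List Int) (w i : Int)
    (h : (pvPositions order).get? w = some i) :
    ∃ k : Nat, i = (k : Int) ∧ order[k]? = some w := by
  refine pvFoldlInsertGetP (P := fun w i => ∃ k : Nat, i = (k : Int) ∧ order[k]? = some w)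
    (PySem.List.enumerate order 0) PySem.Dict.empty ?_ ?_ w i h
  · intro w' i' h'; simp [PySem.Dict.get?_empty] at h'
  · intro p hp
    rw [PySem.List.mem_enumerate_iff] at hp
    obtain ⟨k, hk, rfl⟩ := hp
    exact ⟨k, by simp, by simp [hk]⟩

theorem pvPositions_contains (order : List Int) (w : Int) (hw : w ∈ order) :
    ∃ i, (pvPositions order).get? w = some i := by
  have hkeys : (pvPositions order).keys = PySem.Set.update PySem.Dict.empty.keys ((PySem.List.enumerate order 0).map (·.2)) :=
    PySem.Dict.keys_foldl_insert_key _ _ _ _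
  have hmem : w ∈ (pvPositions order).keys := by
    rw [hkeys, PySem.Set.mem_update]
    right; rw [PySem.List.map_snd_enumerate]; exact hw
  cases hg : (pvPositions order).get? w with
  | none => exact absurd ((PySem.Dict.get?_eq_none_iff_not_mem_keys _ _).mp hg) (by simp [hmem])
  | some i => exact ⟨i, rfl⟩

-- fold of `result.extend(bucket)` is flatten
theorem pvFoldlAppendFlatten (bs : List (List Int)) (acc : List Int) :
    bs.foldl (fun result bucket => result ++ bucket) acc = acc ++ bs.flatten := by
  induction bs generalizing acc with
  | nil => simp
  | cons b bs ih => simp [List.foldl_cons, ih, List.append_assoc]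

-- one `modify` on a map over range
theorem pvModifyMapRange (n : Nat) (g : Nat → List Int) (i : Nat) (f : List Int → List Int) :
    ((List.range n).map g).modify i f
      = (List.range n).map (fun j => if j = i then f (g j) else g j) := by
  apply List.ext_getElem
  · simp [List.length_modify]
  · intro k h1 h2
    simp only [List.getElem_modify, List.getElem_map, List.getElem_range]
    rcases eq_or_ne i k with h | h
    · rw [if_pos h, if_pos h.symm]
    · rw [if_neg h, if_neg h.symm]

-- bucket-fold invariant
theorem pvBucketsInv (key : Int → Nat) (n : Nat) (ws : List Int) (g : Nat → List Int)
    (hw : ∀ w ∈ ws, key w < n) :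
    ws.foldl (fun bs w => bs.modify (key w) (· ++ [w])) ((List.range n).map g)
      = (List.range n).map (fun j => g j ++ ws.filter (fun w => key w = j)) := by
  induction ws generalizing g with
  | nil => simp
  | cons w ws ih =>
    rw [List.foldl_cons, pvModifyMapRange n g (key w) _,
        ih _ (fun q hq => hw q (List.mem_cons_of_mem _ hq))]
    apply List.map_congr_left
    intro j hj
    by_cases h : key w = j
    · simp [h]
    · simp [h, Ne.symm h]

-- inserting one element into its bucket permutes to consing it
theorem pvInsertBucketPerm (f : Nat → List Int) (k : Nat) (w : Int) :
    ∀ (l : List Nat), l.Nodup → k ∈ l →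
      ((l.map (fun j => if k = j then w :: f j else f j)).flatten).Perm (w :: (l.map f).flatten) := by
  intro l
  induction l with
  | nil => intro _ h; simp at h
  | cons j l ih =>
    intro hnd hk
    rcases List.nodup_cons.mp hnd with ⟨hj, hnd'⟩
    by_cases hjk : k = j
    · subst hjk
      have hmapeq : l.map (fun j => if k = j then w :: f j else f j) = l.map f := by
        apply List.map_congr_left
        intro x hx
        have hne : ¬ (k = x) := by rintro rfl; exact hj hx
        rw [if_neg hne]
      simp only [List.map_cons, hmapeq, List.flatten_cons]
      exact List.Perm.refl _
    · have hk' : k ∈ l := (List.mem_cons.mp hk).resolve_left hjk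
      have hperm := ih hnd' hk'
      have e1 : ((j :: l).map (fun j => if k = j then w :: f j else f j)).flatten
          = f j ++ (l.map (fun j => if k = j then w :: f j else f j)).flatten := by
        simp [hjk]
      rw [e1]
      refine (hperm.append_left (f j)).trans ?_
      simp only [List.map_cons, List.flatten_cons]
      exact List.perm_middle

-- concatenating the buckets is a permutation of the input
theorem pvBucketsPerm (key : Int → Nat) (n : Nat) (ws : List Int)
    (hw : ∀ w ∈ ws, key w < n) :
    (((List.range n).map (fun j => ws.filter (fun w => key w = j))).flatten).Perm ws := by
  induction ws with
  | nil => simp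
  | cons w ws ih =>
    have ih' := ih (fun q hq => hw q (List.mem_cons_of_mem _ hq))
    have hstep : (List.range n).map (fun j => (w :: ws).filter (fun w' => key w' = j))
        = (List.range n).map (fun j => if key w = j then w :: ws.filter (fun w' => key w' = j) else ws.filter (fun w' => key w' = j)) := by
      apply List.map_congr_left
      intro j _
      by_cases h : key w = j <;> simp [h]
    rw [hstep]
    have hperm := pvInsertBucketPerm (fun j => ws.filter (fun w' => key w' = j)) (key w) w
      (List.range n) (List.nodup_range) (List.mem_range.mpr (hw w List.mem_cons_self))
    exact hperm.trans (ih'.cons w)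

-- the concatenated buckets are ordered by the integer key
theorem pvBucketsPairwise (f : Nat → List Int) (keyI : Int → Int)
    (h : ∀ j : Nat, ∀ a ∈ f j, keyI a = (j : Int)) :
    ∀ (l : List Nat), l.Pairwise (· < ·) →
      ((l.map f).flatten).Pairwise (fun a b => keyI a ≤ keyI b) := by
  intro l
  induction l with
  | nil => intro _; simp
  | cons j l ih =>
    intro hp
    rcases List.pairwise_cons.mp hp with ⟨hjl, hp'⟩
    simp only [List.map_cons, List.flatten_cons]
    rw [List.pairwise_append]
    refine ⟨List.pairwise_of_forall_mem_list ?_, ih hp', ?_⟩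
    · intro a ha b hb
      rw [h j a ha, h j b hb]
    · intro a ha b hb
      rcases List.mem_flatten.mp hb with ⟨bl, hbl, hbbl⟩
      rcases List.mem_map.mp hbl with ⟨j', hj', rfl⟩
      rw [h j a ha, h j' b hbbl]
      exact_mod_cast (hjl j' hj').le

-- ===== VERDICT (by name: the statement is the Claim_ definition above) =====
theorem angular_witness_order_spec : Claim_equal_angular_witness_order := by
  intro order center witnesses _ hpre
  unfold Spec_angular_witness_order angular_witness_order angular_witness_order_alt
  rcases hpre with ⟨hc, hws⟩
  have hn : 0 < order.length := List.length_pos_of_mem hc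
  have hnI : (0 : Int) < (order.length : Int) := by exact_mod_cast hn
  set positions := pvPositions order with hposdef
  set c := positions.getD center 0 with hcdef
  set keyI : Int → Int := fun w => PySem.Int.mod (positions.getD w 0 - c) (order.length : Int) with hkeyI
  set keyN : Int → Nat := fun w => (keyI w).toNat with hkeyN
  -- key facts
  have hkey_emod : ∀ w : Int, keyI w = (positions.getD w 0 - c) % (order.length : Int) := by
    intro w; rw [hkeyI]; exact PySem.Int.mod_eq_emod_of_pos hnI
  have hkey_nonneg : ∀ w : Int, 0 ≤ keyI w := by
    intro w; rw [hkey_emod]; exact Int.emod_nonneg _ (by omega)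
  have hkey_lt : ∀ w : Int, keyI w < (order.length : Int) := by
    intro w; rw [hkey_emod]; exact Int.emod_lt_of_pos _ hnI
  have hkeyN_lt : ∀ w ∈ witnesses, keyN w < order.length := by
    intro w _
    have h1 := hkey_nonneg w; have h2 := hkey_lt w
    show (keyI w).toNat < order.length
    omega
  have hkeyI_cast : ∀ w : Int, keyI w = ((keyN w : Nat) : Int) := by
    intro w; rw [hkeyN]; exact (Int.toNat_of_nonneg (hkey_nonneg w)).symm
  -- injectivity of keyI on members of witnesses
  have hinj : ∀ a ∈ witnesses, ∀ b ∈ witnesses, keyI a = keyI b → a = b := by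
    intro a ha b hb hk
    obtain ⟨ia, hga⟩ := pvPositions_contains order a (hws a ha)
    obtain ⟨ib, hgb⟩ := pvPositions_contains order b (hws b hb)
    obtain ⟨ka, hka, hoa⟩ := pvPositions_spec order a ia hga
    obtain ⟨kb, hkb, hob⟩ := pvPositions_spec order b ib hgb
    have hda : positions.getD a 0 = ia := PySem.Dict.getD_of_get?_eq_some _ _ hga
    have hdb : positions.getD b 0 = ib := PySem.Dict.getD_of_get?_eq_some _ _ hgb
    rw [hkey_emod, hkey_emod, hda, hdb] at hk
    have hlta : ka < order.length := (List.getElem?_eq_some_iff.mp hoa).1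
    have hltb : kb < order.length := (List.getElem?_eq_some_iff.mp hob).1
    have hdvd : (order.length : Int) ∣ ia - ib := by
      have h0 := Int.emod_eq_emod_iff_emod_sub_eq_zero.mp hk
      have he : ia - c - (ib - c) = ia - ib := by ring
      rw [he] at h0
      exact Int.dvd_of_emod_eq_zero h0
    have habs : |ia - ib| < (order.length : Int) := by
      rw [abs_lt]
      constructor <;> omega
    have h0 : ia - ib = 0 := Int.eq_zero_of_abs_lt_dvd hdvd habs
    have hkk : ka = kb := by omega
    rw [hkk] at hoa
    rw [hoa] at hob
    exact Option.some.inj hob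
  -- B's result as concatenated filters
  have hrepl : List.replicate order.length ([] : List Int)
      = (List.range order.length).map (fun _ => ([] : List Int)) := by
    simp [List.map_const']
  have hmain : PySem.List.sorted witnesses keyI false
      = List.foldl (fun result bucket => result ++ bucket) []
          (witnesses.foldl (fun bs w => bs.modify (keyN w) (· ++ [w]))
            (List.replicate order.length ([] : List Int))) := by
    rw [hrepl, pvBucketsInv keyN order.length witnesses _ hkeyN_lt,
        pvFoldlAppendFlatten, List.nil_append]
    -- prove the sorted list equals the bucket concatenation
    set F := ((List.range order.length).map (fun j => witnesses.filter (fun w => keyN w = j))).flatten with hF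
    have hmemF : ∀ b ∈ F, b ∈ witnesses := by
      intro b hb
      rcases List.mem_flatten.mp hb with ⟨bl, hbl, hbbl⟩
      rcases List.mem_map.mp hbl with ⟨j, _, rfl⟩
      exact (List.mem_filter.mp hbbl).1
    have hpermF : F.Perm witnesses := pvBucketsPerm keyN order.length witnesses hkeyN_lt
    have hpairF : F.Pairwise (fun a b => keyI a ≤ keyI b) := by
      refine pvBucketsPairwise _ keyI ?_ (List.range order.length) List.pairwise_lt_range
      intro j a ha
      have : keyN a = j := by simpa using (List.mem_filter.mp ha).2
      rw [hkeyI_cast a, this]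
    have hpairS : (PySem.List.sorted witnesses keyI false).Pairwise (fun a b => keyI a ≤ keyI b) :=
      PySem.List.sorted_pairwise witnesses keyI
    have hpermS : (PySem.List.sorted witnesses keyI false).Perm witnesses :=
      PySem.List.sorted_perm witnesses keyI false
    refine List.Perm.eq_of_pairwise ?_ hpairS hpairF (hpermS.trans hpermF.symm)
    intro a b ha hb h1 h2
    exact hinj a (hpermS.mem_iff.mp ha) b (hmemF b hb) (le_antisymm h1 h2)
  exact hmain
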